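-- pv_equiv track=rewrite | github.com/google-research/google-research | robust_optim/plotting.py | copy_dotted_flags
-- ===== SOURCE A (Python) =====
-- def get_dotted_flag_value(config, flag):
--   """Returns the value of a dotted tag name in a dictionary."""
--   value = config
--   for flag_i in flag.split('.'):
--     if flag_i not in value:
--       return None
--     value = value[flag_i]
--   return value
--
-- def copy_dotted_flags(config, keep_flags):
--   """Returns a new dictionary with only the flags specified in a dotted format."""
--   new_config = {}
--   for flag in keep_flags:
--     value = get_dotted_flag_value(config, flag)
--     if value is None:
--       continue
--     new_value = new_config
--     flag_i = flag
--     for flag_i in flag.split('.'):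
--       if flag_i not in new_value:
--         new_value[flag_i] = {}
--       new_parent = new_value
--       new_value = new_value[flag_i]
--     new_parent[flag_i] = value
--   return new_config
-- ===== SOURCE B (Python) =====
-- def _lookup(value, parts):
--   """Recursively walk `parts` down the nested dict; None if a key is missing."""
--   if not parts:
--     return value
--   if parts[0] not in value:
--     return None
--   return _lookup(value[parts[0]], parts[1:])
--
--
-- def _insert(d, parts, value):
--   """Recursively set d[p0][p1]...[pn] = value, creating dicts along the way."""
--   if len(parts) == 1:
--     d[parts[0]] = value
--   else:
--     _insert(d.setdefault(parts[0], {}), parts[1:], value)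
--
--
-- def copy_dotted_flags(config, keep_flags):
--   """Returns a new dictionary with only the flags specified in a dotted format."""
--   new_config = {}
--   for flag in keep_flags:
--     parts = flag.split('.')
--     value = _lookup(config, parts)
--     if value is not None:
--       _insert(new_config, parts, value)
--   return new_config
-- ===== Notes on version B (the rewrite author's own statement) =====
-- stated objective: idiomatic
-- what changed: The two pointer-walking loops (with the new_parent back-pointer and throwaway {} leaf) are replaced by two small recursive helpers over the split path, _lookup and _insert, the latter using dict.setdefault.
import Mathlib
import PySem

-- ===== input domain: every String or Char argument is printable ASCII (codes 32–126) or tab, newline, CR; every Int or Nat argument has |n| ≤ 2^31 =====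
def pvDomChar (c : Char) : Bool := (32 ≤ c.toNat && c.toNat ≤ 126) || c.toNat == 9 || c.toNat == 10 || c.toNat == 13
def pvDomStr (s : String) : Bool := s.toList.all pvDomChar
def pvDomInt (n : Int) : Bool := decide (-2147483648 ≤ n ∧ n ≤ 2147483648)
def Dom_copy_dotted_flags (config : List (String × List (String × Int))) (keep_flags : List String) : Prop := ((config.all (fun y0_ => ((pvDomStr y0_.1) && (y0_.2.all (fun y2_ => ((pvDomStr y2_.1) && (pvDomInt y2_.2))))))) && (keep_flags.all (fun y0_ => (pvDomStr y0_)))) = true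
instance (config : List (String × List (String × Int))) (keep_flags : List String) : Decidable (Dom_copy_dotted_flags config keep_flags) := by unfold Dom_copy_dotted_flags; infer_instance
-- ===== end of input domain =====

-- B replaces A's two pointer-walking loops by recursive _lookup/_insert helpers over the split
-- path (using dict.setdefault); equivalence is about the RETURN value only (both versions may
-- alias inner dicts of `config` in their result, as the Python originals do).

-- ===== PORT A =====
-- `for flag_i in flag.split('.'): if flag_i not in value: return None; value = value[flag_i]`
-- ported as a foldl over the parts; the state also remembers at which dict level `value` sits
-- (top dict / inner dict / int leaf); `none` models the early `return None`.
-- When `value` is already an Int and another part remains, Python raises TypeError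
-- (`flag_i not in value` on an int): those inputs are excluded by Pre_ below.
def get_dotted_flag_value (config : List (String × List (String × Int))) (flag : String) :
    Option (Sum (List (String × List (String × Int))) (Sum (List (String × Int)) Int)) :=
  ((PySem.Str.split? flag ".").getD []).foldl
    (fun st flag_i =>
      match st with
      | none => none
      | some (Sum.inl d0) =>
        match (PySem.Dict.mk d0).get? flag_i with
        | none => none
        | some d1 => some (Sum.inr (Sum.inl d1))
      | some (Sum.inr (Sum.inl d1)) =>
        match (PySem.Dict.mk d1).get? flag_i with
        | none => none
        | some n => some (Sum.inr (Sum.inr n))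
      | some (Sum.inr (Sum.inr _)) => none)  -- Python raises TypeError here (outside Pre_)
    (some (Sum.inl config))

def copy_dotted_flags (config : List (String × List (String × Int))) (keep_flags : List String) : List (String × List (String × Int)) :=
  keep_flags.foldl
    (fun new_config flag =>
      match get_dotted_flag_value config flag with
      | none => new_config                       -- `if value is None: continue`
      | some (Sum.inl _) => new_config           -- unreachable: split('.') never yields []
      | some (Sum.inr value) =>
        -- the write loop walks `new_value` down the split parts; with this type it runs at
        -- most two iterations, so it is ported by cases on the parts list:
        match (PySem.Str.split? flag ".").getD [], value with
        | [k], Sum.inl d1 => ((PySem.Dict.mk new_config).insert k d1).items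
        | [k1, k2], Sum.inr n =>
          -- iter 1: `if k1 not in new_value: new_value[k1] = {}` then step into it
          let inner := (PySem.Dict.mk new_config).getD k1 []
          -- iter 2 writes a throwaway `{}` at k2, immediately overwritten by
          -- `new_parent[flag_i] = value`; net effect on the inner dict: insert k2 n
          ((PySem.Dict.mk new_config).insert k1 ((PySem.Dict.mk inner).insert k2 n).items).items
        | _, _ => new_config)                    -- unreachable: value shape matches parts length
    []

-- ===== PORT B =====
-- B's recursive `_lookup(value, parts)`, one helper per dict level of `value`
-- (`if parts[0] not in value: return None; return _lookup(value[parts[0]], parts[1:])`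
-- is ported as get? + Option.bind):
def pvLookupInt (n : Int) (parts : List String) : Option (Sum (List (String × Int)) Int) :=
  if parts.isEmpty then some (Sum.inr n)
  else none  -- Python raises TypeError (`in` on an int): outside Pre_ below

def pvLookupInner (d1 : List (String × Int)) (parts : List String) : Option (Sum (List (String × Int)) Int) :=
  match parts with
  | [] => some (Sum.inl d1)
  | k :: rest => ((PySem.Dict.mk d1).get? k).bind (fun n => pvLookupInt n rest)

def pvLookup (d0 : List (String × List (String × Int))) (parts : List String) : Option (Sum (List (String × Int)) Int) :=
  match parts with
  | [] => none  -- unreachable from copy_dotted_flags_alt: split('.') never yields []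
  | k :: rest => ((PySem.Dict.mk d0).get? k).bind (fun d1 => pvLookupInner d1 rest)

-- B's recursive `_insert(d, parts, value)`, one helper per dict level of `d`;
-- `len(parts) == 1` is `rest.isEmpty`, the value's shape is handled by Sum.elim:
def pvInsertInner (d1 : List (String × Int)) (parts : List String) (v : Sum (List (String × Int)) Int) : List (String × Int) :=
  match parts with
  | [] => d1  -- unreachable: recursion strips exactly one part per level
  | k :: rest =>
    if rest.isEmpty then
      -- `d[parts[0]] = value`; a dict value here is unreachable (_lookup hands an Int down)
      Sum.elim (fun _ => d1) (fun n => ((PySem.Dict.mk d1).insert k n).items) v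
    else d1  -- unreachable below the inner level: leaves are ints

def pvInsert (d0 : List (String × List (String × Int))) (parts : List String) (v : Sum (List (String × Int)) Int) : List (String × List (String × Int)) :=
  match parts with
  | [] => d0  -- unreachable: split('.') never yields []
  | k :: rest =>
    if rest.isEmpty then
      -- `d[parts[0]] = value`; an int value here is unreachable (a 1-part value is a dict)
      Sum.elim (fun d1 => ((PySem.Dict.mk d0).insert k d1).items) (fun _ => d0) v
    else
      -- `_insert(d.setdefault(parts[0], {}), parts[1:], value)`
      ((PySem.Dict.mk d0).insert k (pvInsertInner ((PySem.Dict.mk d0).getD k []) rest v)).items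

def copy_dotted_flags_alt (config : List (String × List (String × Int))) (keep_flags : List String) : List (String × List (String × Int)) :=
  keep_flags.foldl
    (fun new_config flag =>
      let parts := (PySem.Str.split? flag ".").getD []
      -- `if value is not None: _insert(new_config, parts, value)`
      (pvLookup config parts).elim new_config (fun v => pvInsert new_config parts v))
    []

-- ===== PRECONDITION & SPEC =====
-- Pre_ excludes exactly the inputs where the Python raises TypeError: a flag with three or
-- more dotted parts whose first two parts are both present in `config` (the membership test
-- `part3 in value` then runs on an int).
def pvFlagOk (config : List (String × List (String × Int))) (flag : String) : Bool :=
  let parts := (PySem.Str.split? flag ".").getD []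
  decide (parts.length ≤ 2) ||
    ((((PySem.Dict.mk config).get? (parts.getD 0 "")).bind
        (fun d1 => (PySem.Dict.mk d1).get? (parts.getD 1 ""))) == none)

def Pre_copy_dotted_flags (config : List (String × List (String × Int))) (keep_flags : List String) : Prop :=
  ∀ flag ∈ keep_flags, pvFlagOk config flag = true
instance (config : List (String × List (String × Int))) (keep_flags : List String) : Decidable (Pre_copy_dotted_flags config keep_flags) := by unfold Pre_copy_dotted_flags; infer_instance

def pvWitness_copy_dotted_flags : (List (String × List (String × Int))) × List String :=
  ([("optim", [("lr", 3), ("steps", 100)]), ("model", [("width", 8)])],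
   ["optim.lr", "model", "optim.missing", "absent.x.y"])

def Spec_copy_dotted_flags (config : List (String × List (String × Int))) (keep_flags : List String) (out : List (String × List (String × Int))) : Prop := out = copy_dotted_flags_alt config keep_flags
instance (config : List (String × List (String × Int))) (keep_flags : List String) (out : List (String × List (String × Int))) : Decidable (Spec_copy_dotted_flags config keep_flags out) := by unfold Spec_copy_dotted_flags; infer_instance

-- ===== CLAIM (what is proved, stated in full; the proofs are below) =====
def Claim_equal_copy_dotted_flags : Prop := ∀ (config : List (String × List (String × Int))) (keep_flags : List String), Dom_copy_dotted_flags config keep_flags → Pre_copy_dotted_flags config keep_flags → Spec_copy_dotted_flags config keep_flags (copy_dotted_flags config keep_flags)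

-- ===== LEMMAS AND PROOFS =====

-- A's get-loop absorbs `none` (the early `return None`).
lemma getA_none_absorb (f : Option (Sum (List (String × List (String × Int))) (Sum (List (String × Int)) Int)) →
    String → Option (Sum (List (String × List (String × Int))) (Sum (List (String × Int)) Int)))
    (hf : ∀ s, f none s = none) (l : List String) : l.foldl f none = none := by
  induction l with
  | nil => rfl
  | cons x xs ih => simp [List.foldl, hf, ih]

lemma getA_foldl_none (l : List String) :
    l.foldl
      (fun (st : Option (Sum (List (String × List (String × Int))) (Sum (List (String × Int)) Int))) flag_i =>
        match st with
        | none => none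
        | some (Sum.inl d0) =>
          match (PySem.Dict.mk d0).get? flag_i with
          | none => none
          | some d1 => some (Sum.inr (Sum.inl d1))
        | some (Sum.inr (Sum.inl d1)) =>
          match (PySem.Dict.mk d1).get? flag_i with
          | none => none
          | some n => some (Sum.inr (Sum.inr n))
        | some (Sum.inr (Sum.inr _)) => none)
      none = none :=
  getA_none_absorb _ (fun _ => rfl) l

-- the two per-flag step functions agree on every accumulator and flag
lemma step_eq (config : List (String × List (String × Int)))
    (new_config : List (String × List (String × Int))) (flag : String) :
    (match get_dotted_flag_value config flag with
      | none => new_config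
      | some (Sum.inl _) => new_config
      | some (Sum.inr value) =>
        match (PySem.Str.split? flag ".").getD [], value with
        | [k], Sum.inl d1 => ((PySem.Dict.mk new_config).insert k d1).items
        | [k1, k2], Sum.inr n =>
          let inner := (PySem.Dict.mk new_config).getD k1 []
          ((PySem.Dict.mk new_config).insert k1 ((PySem.Dict.mk inner).insert k2 n).items).items
        | _, _ => new_config)
    = (pvLookup config ((PySem.Str.split? flag ".").getD [])).elim new_config
        (fun v => pvInsert new_config ((PySem.Str.split? flag ".").getD []) v) := by
  unfold get_dotted_flag_value
  cases hp : (PySem.Str.split? flag ".").getD [] with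
  | nil => simp [pvLookup]
  | cons k1 rest =>
    cases rest with
    | nil =>
      simp only [List.foldl, pvLookup]
      cases (PySem.Dict.mk config).get? k1 <;>
        simp [pvLookupInner, pvInsert]
    | cons k2 rest2 =>
      simp only [List.foldl, pvLookup]
      cases h1 : (PySem.Dict.mk config).get? k1 with
      | none => rw [getA_foldl_none]; simp
      | some d1 =>
        cases rest2 with
        | nil =>
          simp only [List.foldl, pvLookupInner]
          cases h2 : (PySem.Dict.mk d1).get? k2 <;>
            simp [h2, pvLookupInt, pvInsert, pvInsertInner]
        | cons k3 rest3 =>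
          simp only [List.foldl, pvLookupInner]
          cases (PySem.Dict.mk d1).get? k2 <;>
            simp [pvLookupInt, getA_foldl_none]

-- ===== VERDICT (by name: the statement is the Claim_ definition above) =====
theorem copy_dotted_flags_spec : Claim_equal_copy_dotted_flags := by
  intro config keep_flags _ _
  unfold Spec_copy_dotted_flags copy_dotted_flags copy_dotted_flags_alt
  congr 1
  funext new_config flag
  exact step_eq config new_config flag
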